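-- pv_equiv track=rewrite | github.com/pamelaAHeredia/PythonUNSAM-2021 | Clase02/diccionario_geringoso.py | convertir
-- ===== SOURCE A (Python) =====
-- def convertir(palabras):
--     d = {}
--     for n in palabras:
--         c = ''
--         for i in n:
--             if i.lower() not in 'aeiou':
--                 c += i
--             else:
--                 c += i+'p'+i
--         d[n] = c
--     return d
-- ===== SOURCE B (Python) =====
-- def convertir(palabras):
--     table = {ord(v): v + 'p' + v for v in 'aeiouAEIOU'}
--     return {n: n.translate(table) for n in palabras}
-- ===== Notes on version B (the rewrite author's own statement) =====
-- stated objective: idiomatic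
-- what changed: Replaces the per-character if/else accumulation loop and manual dict building with a precomputed ord->replacement translation table applied via str.translate inside a dict comprehension.
import Mathlib
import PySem

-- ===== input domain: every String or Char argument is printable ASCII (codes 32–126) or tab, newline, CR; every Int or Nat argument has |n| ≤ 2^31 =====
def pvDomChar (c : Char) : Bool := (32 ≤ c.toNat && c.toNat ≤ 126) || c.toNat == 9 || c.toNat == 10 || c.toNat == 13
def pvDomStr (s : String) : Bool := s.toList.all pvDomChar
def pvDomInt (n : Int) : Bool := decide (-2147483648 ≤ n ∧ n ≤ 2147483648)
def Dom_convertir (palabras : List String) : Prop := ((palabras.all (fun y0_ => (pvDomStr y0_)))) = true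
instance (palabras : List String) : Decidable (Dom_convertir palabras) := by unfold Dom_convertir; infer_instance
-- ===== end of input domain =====

-- B replaces A's per-character if/else accumulation with a precomputed ord->replacement
-- translation table applied per codepoint (str.translate); idiomatic, same cost.

-- ===== PORT A =====
-- inner loop of A: c = ''; for i in n: if i.lower() not in 'aeiou': c += i else: c += i+'p'+i
-- (i.lower() for a single char is PySem.Chars.lowerChar; one-char 'in' a string is char membership)
def pvGeringosoA (n : String) : String :=
  String.mk (n.toList.foldl (fun c i =>
    if PySem.Chars.lowerChar i ∉ (['a', 'e', 'i', 'o', 'u'] : List Char) then c ++ [i] else c ++ [i, 'p', i]) [])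

def convertir (palabras : List String) : List (String × String) :=
  (palabras.foldl (fun d n => d.insert n (pvGeringosoA n)) PySem.Dict.empty).items

-- ===== PORT B =====
-- table = {ord(v): v+'p'+v for v in 'aeiouAEIOU'}
def pvTable : PySem.Dict Int String :=
  (['a', 'e', 'i', 'o', 'u', 'A', 'E', 'I', 'O', 'U'] : List Char).foldl
    (fun d v => d.insert ((v.toNat : Int)) (String.mk [v, 'p', v])) PySem.Dict.empty

-- one char of n.translate(table): look the codepoint up, keep the char when absent
-- (exact for this table: every value is a string, no None/int entries)
def pvTrChar (ch : Char) : List Char :=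
  match pvTable.get? ((ch.toNat : Int)) with
  | some r => r.toList
  | none => [ch]

def pvTranslate (n : String) : String :=
  String.mk (n.toList.flatMap pvTrChar)

def convertir_alt (palabras : List String) : List (String × String) :=
  (palabras.foldl (fun d n => d.insert n (pvTranslate n)) PySem.Dict.empty).items

-- ===== PRECONDITION & SPEC =====
def Spec_convertir (palabras : List String) (out : List (String × String)) : Prop := out = convertir_alt palabras
instance (palabras : List String) (out : List (String × String)) : Decidable (Spec_convertir palabras out) := by unfold Spec_convertir; infer_instance

-- ===== CLAIM (what is proved, stated in full; the proofs are below) =====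
def Claim_equal_convertir : Prop := ∀ (palabras : List String), Dom_convertir palabras → Spec_convertir palabras (convertir palabras)

-- ===== LEMMAS AND PROOFS =====

-- c.toNat determines c
theorem pv_char_of_toNat (c : Char) (k : Nat) (h : c.toNat = k) : c = Char.ofNat k := by
  have := Char.ofNat_toNat c; rw [h] at this; exact this.symm

theorem pv_toNat_ne (c : Char) (k : Nat) (h : c ≠ Char.ofNat k) : c.toNat ≠ k :=
  fun hk => h (pv_char_of_toNat c k hk)

-- the per-character transforms agree
set_option maxHeartbeats 2000000 in
theorem pv_char_eq (i : Char) :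
    (if PySem.Chars.lowerChar i ∉ (['a', 'e', 'i', 'o', 'u'] : List Char) then [i] else [i, 'p', i]) = pvTrChar i := by
  by_cases h : i ∈ ['a', 'e', 'i', 'o', 'u', 'A', 'E', 'I', 'O', 'U']
  · fin_cases h <;> decide
  · simp only [List.mem_cons, not_or] at h
    obtain ⟨ha, he, hi, ho, hu, hA, hE, hI, hO, hU, -⟩ := h
    have na := pv_toNat_ne i 97 ha
    have ne := pv_toNat_ne i 101 he
    have ni := pv_toNat_ne i 105 hi
    have no := pv_toNat_ne i 111 ho
    have nu := pv_toNat_ne i 117 hu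
    have nA := pv_toNat_ne i 65 hA
    have nE := pv_toNat_ne i 69 hE
    have nI := pv_toNat_ne i 73 hI
    have nO := pv_toNat_ne i 79 hO
    have nU := pv_toNat_ne i 85 hU
    have hnone : pvTable.get? ((i.toNat : Int)) = none := by
      have ht : pvTable = PySem.Dict.mk
        [((97 : Int), "apa"), (101, "epe"), (105, "ipi"), (111, "opo"), (117, "upu"),
         (65, "ApA"), (69, "EpE"), (73, "IpI"), (79, "OpO"), (85, "UpU")] := by decide
      rw [ht]
      simp only [PySem.Dict.get?_mk_cons, beq_iff_eq]
      split_ifs <;> first | rfl | (exfalso; omega)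
    have hlow : PySem.Chars.lowerChar i ∉ (['a', 'e', 'i', 'o', 'u'] : List Char) := by
      unfold PySem.Chars.lowerChar PySem.Chars.isupper
      by_cases hup : 'A' ≤ i ∧ i ≤ 'Z'
      · have h1 : 65 ≤ i.toNat := hup.1
        have h2 : i.toNat ≤ 90 := hup.2
        have hval : (Char.ofNat (i.toNat + 32)).toNat = i.toNat + 32 := by
          have hv : (i.toNat + 32).isValidChar := Or.inl (by omega)
          rw [Char.toNat_ofNat]; simp [hv]
        rw [if_pos (by simp [hup.1, hup.2])]
        intro hmem
        have hval2 : (Char.ofNat (i.toNat + 32)).toNat = 97 ∨ (Char.ofNat (i.toNat + 32)).toNat = 101 ∨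
               (Char.ofNat (i.toNat + 32)).toNat = 105 ∨ (Char.ofNat (i.toNat + 32)).toNat = 111 ∨
               (Char.ofNat (i.toNat + 32)).toNat = 117 := by
          simp only [List.mem_cons, List.not_mem_nil, or_false] at hmem
          rcases hmem with hc | hc | hc | hc | hc
          · exact Or.inl (by rw [hc]; rfl)
          · exact Or.inr (Or.inl (by rw [hc]; rfl))
          · exact Or.inr (Or.inr (Or.inl (by rw [hc]; rfl)))
          · exact Or.inr (Or.inr (Or.inr (Or.inl (by rw [hc]; rfl))))
          · exact Or.inr (Or.inr (Or.inr (Or.inr (by rw [hc]; rfl))))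
        rw [hval] at hval2
        omega
      · rw [if_neg (by simp only [Bool.and_eq_true, decide_eq_true_eq]; exact hup)]
        intro hmem
        simp only [List.mem_cons, List.not_mem_nil, or_false] at hmem
        rcases hmem with hc | hc | hc | hc | hc
        · exact ha hc
        · exact he hc
        · exact hi hc
        · exact ho hc
        · exact hu hc
    rw [if_pos hlow]
    unfold pvTrChar
    rw [hnone]

-- A's accumulation loop equals B's flatMap
theorem pv_loop_eq (cs : List Char) (acc : List Char) :
    cs.foldl (fun c i =>
      if PySem.Chars.lowerChar i ∉ (['a', 'e', 'i', 'o', 'u'] : List Char) then c ++ [i] else c ++ [i, 'p', i]) acc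
      = acc ++ cs.flatMap pvTrChar := by
  induction cs generalizing acc with
  | nil => simp
  | cons c rest ih =>
    have hstep : (if PySem.Chars.lowerChar c ∉ (['a', 'e', 'i', 'o', 'u'] : List Char) then acc ++ [c] else acc ++ [c, 'p', c])
        = acc ++ pvTrChar c := by
      rw [← pv_char_eq c]; split_ifs <;> rfl
    simp only [List.foldl_cons, List.flatMap_cons, hstep, ih, List.append_assoc]

theorem pv_word_eq : pvGeringosoA = pvTranslate := by
  funext n
  unfold pvGeringosoA pvTranslate
  rw [pv_loop_eq]
  rfl

-- ===== VERDICT (by name: the statement is the Claim_ definition above) =====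
theorem convertir_spec : Claim_equal_convertir := by
  intro palabras _
  unfold Spec_convertir convertir convertir_alt
  rw [pv_word_eq]
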